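-- pv_equiv track=rewrite | github.com/MForofontov/python_utils | iterable_functions/set_operations/partition_set_into_n_parts.py | partition_set_into_n_parts
-- ===== SOURCE A (Python) =====
-- from typing import TypeVar
--
-- T = TypeVar("T")
--
-- def partition_set_into_n_parts(input_set: set[T], n: int) -> list[set[T]]:
--     """
--     Partition a set into n approximately equal-sized subsets.
--
--     This distributes elements as evenly as possible across n subsets.
--
--     Parameters
--     ----------
--     input_set : set[T]
--         The input set to partition.
--     n : int
--         Number of partitions to create.
--
--     Returns
--     -------
--     list[set[T]]
--         List of n subsets. The union of all subsets equals the input set,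
--         and all subsets are pairwise disjoint.
--
--     Raises
--     ------
--     TypeError
--         If input_set is not a set or n is not an int.
--     ValueError
--         If n is less than 1.
--
--     Examples
--     --------
--     >>> numbers = {1, 2, 3, 4, 5, 6, 7}
--     >>> partitions = partition_set_into_n_parts(numbers, 3)
--     >>> len(partitions)
--     3
--     >>> sum(len(p) for p in partitions) == len(numbers)
--     True
--
--     >>> # Check that partitions are disjoint
--     >>> all(len(p1 & p2) == 0 for i, p1 in enumerate(partitions)
--     ...     for p2 in partitions[i+1:])
--     True
--
--     Notes
--     -----
--     Elements are distributed round-robin fashion to ensure approximately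
--     equal sizes. The order of elements in each partition is not guaranteed.
--
--     Complexity
--     ----------
--     Time: O(n), Space: O(n)
--     """
--     # Input validation
--     if not isinstance(input_set, set):
--         raise TypeError(f"input_set must be a set, got {type(input_set).__name__}")
--
--     if type(n) is not int:
--         raise TypeError(f"n must be an int, got {type(n).__name__}")
--
--     if n < 1:
--         raise ValueError(f"n must be at least 1, got {n}")
--
--     # Handle edge cases
--     if n >= len(input_set):
--         # More partitions than elements
--         partitions: list[set[T]] = [set() for _ in range(n)]
--         for i, element in enumerate(input_set):
--             if i < n:
--                 partitions[i].add(element)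
--         return partitions
--
--     # Convert to list for indexing
--     elements = list(input_set)
--
--     # Create partitions
--     partitions = [set() for _ in range(n)]
--
--     # Distribute elements round-robin
--     for i, element in enumerate(elements):
--         partition_index = i % n
--         partitions[partition_index].add(element)
--
--     return partitions
-- ===== SOURCE B (Python) =====
-- def partition_set_into_n_parts(input_set, n):
--     # Input validation (identical to A's)
--     if not isinstance(input_set, set):
--         raise TypeError(f"input_set must be a set, got {type(input_set).__name__}")
--
--     if type(n) is not int:
--         raise TypeError(f"n must be an int, got {type(n).__name__}")
--
--     if n < 1:
--         raise ValueError(f"n must be at least 1, got {n}")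
--
--     elements = list(input_set)
--     # Partition j holds the elements at strided positions j, j+n, j+2n, ...
--     return [set(elements[j::n]) for j in range(n)]
-- ===== Notes on version B (the rewrite author's own statement) =====
-- stated objective: simpler
-- what changed: B replaces A's element-indexed round-robin loop (and its redundant n>=len special case) with one strided slice elements[j::n] per partition, built in a single comprehension over the n partitions.
import Mathlib
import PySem

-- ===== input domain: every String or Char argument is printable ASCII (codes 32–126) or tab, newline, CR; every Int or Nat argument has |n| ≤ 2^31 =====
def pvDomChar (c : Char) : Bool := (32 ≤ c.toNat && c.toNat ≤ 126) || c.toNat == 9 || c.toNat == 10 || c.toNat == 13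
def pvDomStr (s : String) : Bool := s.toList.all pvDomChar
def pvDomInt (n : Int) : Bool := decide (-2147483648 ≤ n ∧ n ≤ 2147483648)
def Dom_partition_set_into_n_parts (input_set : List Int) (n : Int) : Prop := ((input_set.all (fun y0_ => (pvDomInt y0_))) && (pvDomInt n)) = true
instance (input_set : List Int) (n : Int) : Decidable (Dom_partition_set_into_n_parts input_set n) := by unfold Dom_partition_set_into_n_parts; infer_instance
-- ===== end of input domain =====

-- B builds each partition directly as a strided slice elements[j::n] instead of A's
-- element-indexed round-robin loop; objective: simpler (the n>=len special case disappears).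


-- ===== PORT A =====
-- Model of CPython's int-set: pvPySetList xs = list(set(xs)) in Python's hash-table
-- iteration order (open addressing, perturb probing, growth at 3/5 load); this is the
-- 'for element in input_set' / 'list(input_set)' iteration order both Pythons share.
-- Exact for |x| ≤ 2^31 (validated differentially); fuel is generous to stay total.
def pvPyHash (k : Int) : Int :=
  let p : Int := 2305843009213693951
  let h : Int := if 0 ≤ k then k.emod p else -((-k).emod p)
  if h = -1 then -2 else h

-- scan a linear run of cnt slots from j: some (some j) = empty slot, some none = key present
def pvScan (table : List (Option (Int × Int))) (key h : Int) (check : Bool) :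
    Nat → Nat → Option (Option Nat)
  | 0, _ => none
  | cnt + 1, j =>
    match table.getD j none with
    | none => some (some j)
    | some (k2, h2) =>
        if check && h2 == h && k2 == key then some none
        else pvScan table key h check cnt (j + 1)

def pvProbeGo (table : List (Option (Int × Int))) (size : Nat) (key h : Int) (check : Bool) :
    Nat → Nat → Nat → Option Nat
  | 0, _, _ => none
  | fuel + 1, i, perturb =>
    let probes := if i + 9 ≤ size - 1 then 9 else 0
    match pvScan table key h check (probes + 1) i with
    | some r => r
    | none =>
        pvProbeGo table size key h check fuel
          ((i * 5 + (perturb >>> 5) + 1) % size) (perturb >>> 5)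

def pvFindSlot (table : List (Option (Int × Int))) (size : Nat) (key h : Int) (check : Bool) :
    Option Nat :=
  let hu := (h.emod 18446744073709551616).toNat
  pvProbeGo table size key h check (size * 64 + 64) (hu % size) hu

def pvNewSize (minused : Nat) : Nat → Nat → Nat
  | 0, cur => cur
  | f + 1, cur => if cur ≤ minused then pvNewSize minused f (cur * 2) else cur

def pvInsertClean (table : List (Option (Int × Int))) (size : Nat) (e : Int × Int) :
    List (Option (Int × Int)) :=
  match pvFindSlot table size e.1 e.2 false with
  | some j => table.set j (some e)
  | none => table

def pvSetAddStep (st : List (Option (Int × Int)) × Nat × Nat) (x : Int) :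
    List (Option (Int × Int)) × Nat × Nat :=
  let (table, size, used) := st
  let h := pvPyHash x
  match pvFindSlot table size x h true with
  | none => (table, size, used)
  | some j =>
    let table' := table.set j (some (x, h))
    let used' := used + 1
    if used' * 5 ≥ (size - 1) * 3 then
      let newsize := pvNewSize (used' * 4) 64 8
      let t := (table'.filterMap id).foldl
        (fun t e => pvInsertClean t newsize e) (List.replicate newsize none)
      (t, newsize, used')
    else (table', size, used')

def pvPySetList (xs : List Int) : List Int :=
  let st := xs.foldl pvSetAddStep (List.replicate 8 none, 8, 0)
  (st.1.filterMap id).map (fun e => e.1)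

-- partitions[idx].add(element)  (idx is a valid nonnegative index in both loops)
def pvAddAt (parts : List (List Int)) (idx : Int) (e : Int) : List (List Int) :=
  PySem.List.pySetD parts idx (PySem.Set.add (PySem.List.pyGetD parts idx ([] : List Int)) e)

-- the 'for i, element in enumerate(input_set): if i < n: partitions[i].add(element)' loop
def pvLoop1 : List Int → Nat → Int → List (List Int) → List (List Int)
  | [], _, _, parts => parts
  | e :: rest, i, n, parts =>
      pvLoop1 rest (i + 1) n (if (i : Int) < n then pvAddAt parts (i : Int) e else parts)

-- the 'for i, element in enumerate(elements): partitions[i % n].add(element)' loop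
def pvLoop2 : List Int → Nat → Int → List (List Int) → List (List Int)
  | [], _, _, parts => parts
  | e :: rest, i, n, parts =>
      pvLoop2 rest (i + 1) n (pvAddAt parts (PySem.Int.mod (i : Int) n) e)

def partition_set_into_n_parts (input_set : List Int) (n : Int) : List (List Int) :=
  let s := pvPySetList input_set   -- the Python set's elements in its iteration order
  if n ≥ (s.length : Int) then
    pvLoop1 s 0 n (List.replicate n.toNat (PySem.Set.empty : List Int))
  else
    let elements := s
    pvLoop2 elements 0 n (List.replicate n.toNat (PySem.Set.empty : List Int))

-- ===== PORT B =====
-- B's own rendering of the same forced CPython int-set iteration order (B's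
-- 'elements = list(input_set)'), written independently: hash-table state kept in a
-- structure, explicit recursion instead of folds (proved equal to A's model below).
structure BTab where
  slots : List (Option (Int × Int))
  cap : Nat
  fill : Nat

def bHash (x : Int) : Int :=
  if 0 ≤ x then x.emod 2305843009213693951
  else
    let m := (-x).emod 2305843009213693951
    if m = 1 then -2 else -m

def bScan (slots : List (Option (Int × Int))) (x hx : Int) (chk : Bool) :
    Nat → Nat → Option (Option Nat)
  | 0, _ => none
  | c + 1, j =>
    match slots.getD j none with
    | none => some (some j)
    | some e =>
        if (e.2 == hx && e.1 == x) && chk then some none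
        else bScan slots x hx chk c (j + 1)

def bProbe (slots : List (Option (Int × Int))) (cap : Nat) (x hx : Int) (chk : Bool) :
    Nat → Nat → Nat → Option Nat
  | 0, _, _ => none
  | f + 1, j, pert =>
    let run : Nat := if j + 9 ≤ cap - 1 then 10 else 1
    match bScan slots x hx chk run j with
    | some r => r
    | none =>
        let p := pert >>> 5
        bProbe slots cap x hx chk f ((5 * j + p + 1) % cap) p

def bLocate (slots : List (Option (Int × Int))) (cap : Nat) (x hx : Int) (chk : Bool) :
    Option Nat :=
  let u := (hx.emod (2 ^ 64)).toNat
  bProbe slots cap x hx chk (64 * (cap + 1)) (u % cap) u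

def bGrow (m : Nat) : Nat → Nat → Nat
  | 0, c => c
  | f + 1, c => if m < c then c else bGrow m f (2 * c)

def bRehash (cap : Nat) : List (Option (Int × Int)) → List (Int × Int) → List (Option (Int × Int))
  | acc, [] => acc
  | acc, e :: es =>
      bRehash cap
        (match bLocate acc cap e.1 e.2 false with
         | some j => acc.set j (some e)
         | none => acc) es

def bInsert (t : BTab) (x : Int) : BTab :=
  let hx := bHash x
  match bLocate t.slots t.cap x hx true with
  | none => t
  | some j =>
      let slots' := t.slots.set j (some (x, hx))
      let fill' := t.fill + 1
      if 3 * (t.cap - 1) ≤ 5 * fill' then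
        let cap' := bGrow (4 * fill') 64 8
        ⟨bRehash cap' (List.replicate cap' none) (slots'.filterMap id), cap', fill'⟩
      else ⟨slots', t.cap, fill'⟩

def bFill : BTab → List Int → BTab
  | t, [] => t
  | t, x :: xs => bFill (bInsert t x) xs

def bElems (xs : List Int) : List Int :=
  ((bFill ⟨List.replicate 8 none, 8, 0⟩ xs).slots.filterMap id).map (·.1)

-- pvStride xs m ports the slice xs[::m]; used only with m = n ≥ 1, where it is exact.
def pvStride (xs : List Int) (m : Nat) : List Int :=
  match xs with
  | [] => []
  | x :: rest => x :: pvStride (rest.drop (m - 1)) m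
termination_by xs.length
decreasing_by simp

def partition_set_into_n_parts_alt (input_set : List Int) (n : Int) : List (List Int) :=
  let elements := bElems input_set
  (PySem.List.pyRange 0 n 1).map
    (fun j => PySem.Set.ofList (pvStride (elements.drop j.toNat) n.toNat))

-- ===== PRECONDITION & SPEC =====
-- A raises ValueError when n < 1; nothing else is excluded.
def Pre_partition_set_into_n_parts (_input_set : List Int) (n : Int) : Prop := 1 ≤ n
instance (input_set : List Int) (n : Int) : Decidable (Pre_partition_set_into_n_parts input_set n) := by unfold Pre_partition_set_into_n_parts; infer_instance
def pvWitness_partition_set_into_n_parts : List Int × Int := ([1, 2, 3, 4, 5], 2)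

def Spec_partition_set_into_n_parts (input_set : List Int) (n : Int) (out : List (List Int)) : Prop := out = partition_set_into_n_parts_alt input_set n
instance (input_set : List Int) (n : Int) (out : List (List Int)) : Decidable (Spec_partition_set_into_n_parts input_set n out) := by unfold Spec_partition_set_into_n_parts; infer_instance

-- ===== CLAIM (what is proved, stated in full; the proofs are below) =====
def Claim_equal_partition_set_into_n_parts : Prop := ∀ (input_set : List Int) (n : Int), Dom_partition_set_into_n_parts input_set n → Pre_partition_set_into_n_parts input_set n → Spec_partition_set_into_n_parts input_set n (partition_set_into_n_parts input_set n)

-- ===== LEMMAS AND PROOFS =====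

-- B's set model computes A's set model, function by function.
lemma bHash_eq (x : Int) : bHash x = pvPyHash x := by
  simp only [bHash, pvPyHash, show ∀ a b : Int, a.emod b = a % b from fun _ _ => rfl]
  split_ifs <;> omega

lemma bScan_eq (slots : List (Option (Int × Int))) (x hx : Int) (chk : Bool) :
    ∀ (c j : Nat), bScan slots x hx chk c j = pvScan slots x hx chk c j := by
  intro c
  induction c with
  | zero => intro j; rfl
  | succ c ih =>
      intro j
      show bScan slots x hx chk (c + 1) j = pvScan slots x hx chk (c + 1) j
      unfold bScan pvScan
      match h : slots.getD j none with
      | none => simp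
      | some (k2, h2) =>
          simp only
          have : ((h2 == hx && k2 == x) && chk) = (chk && h2 == hx && k2 == x) := by
            cases chk <;> cases hb : (h2 == hx) <;> cases hb2 : (k2 == x) <;> rfl
          rw [this, ih]

lemma bProbe_eq (slots : List (Option (Int × Int))) (cap : Nat) (x hx : Int) (chk : Bool) :
    ∀ (f j pert : Nat), bProbe slots cap x hx chk f j pert = pvProbeGo slots cap x hx chk f j pert := by
  intro f
  induction f with
  | zero => intro j pert; rfl
  | succ f ih =>
      intro j pert
      show bProbe slots cap x hx chk (f + 1) j pert = pvProbeGo slots cap x hx chk (f + 1) j pert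
      unfold bProbe pvProbeGo
      simp only [bScan_eq]
      have hrun : (if j + 9 ≤ cap - 1 then 10 else 1) = (if j + 9 ≤ cap - 1 then 9 else 0) + 1 := by
        split_ifs <;> rfl
      rw [hrun]
      match pvScan slots x hx chk ((if j + 9 ≤ cap - 1 then 9 else 0) + 1) j with
      | some r => rfl
      | none => simp only; rw [ih]; ring_nf

lemma bLocate_eq (slots : List (Option (Int × Int))) (cap : Nat) (x hx : Int) (chk : Bool) :
    bLocate slots cap x hx chk = pvFindSlot slots cap x hx chk := by
  have h1 : (64 : Nat) * (cap + 1) = cap * 64 + 64 := by ring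
  have h2 : ((2 : Int) ^ 64) = 18446744073709551616 := by norm_num
  simp only [bLocate, pvFindSlot, bProbe_eq, h1, h2]

lemma bGrow_eq (m : Nat) : ∀ (f c : Nat), bGrow m f c = pvNewSize m f c := by
  intro f
  induction f with
  | zero => intro c; rfl
  | succ f ih =>
      intro c
      show bGrow m (f + 1) c = pvNewSize m (f + 1) c
      unfold bGrow pvNewSize
      rcases Nat.lt_or_ge m c with h | h
      · rw [if_pos h, if_neg (by omega)]
      · rw [if_neg (by omega), if_pos (by omega), ih, Nat.mul_comm]

lemma bRehash_eq (cap : Nat) :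
    ∀ (es : List (Int × Int)) (acc : List (Option (Int × Int))),
      bRehash cap acc es = es.foldl (fun t e => pvInsertClean t cap e) acc := by
  intro es
  induction es with
  | nil => intro acc; rfl
  | cons e es ih =>
      intro acc
      show bRehash cap acc (e :: es) = _
      unfold bRehash
      rw [ih, List.foldl_cons]
      congr 1
      unfold pvInsertClean
      rw [bLocate_eq]

lemma bInsert_eq (s : List (Option (Int × Int))) (c u : Nat) (x : Int) :
    bInsert ⟨s, c, u⟩ x =
      ⟨(pvSetAddStep (s, c, u) x).1, (pvSetAddStep (s, c, u) x).2.1, (pvSetAddStep (s, c, u) x).2.2⟩ := by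
  unfold bInsert pvSetAddStep
  simp only [bHash_eq, bLocate_eq]
  match pvFindSlot s c x (pvPyHash x) true with
  | none => rfl
  | some j =>
      simp only
      have hcond : (3 * (c - 1) ≤ 5 * (u + 1)) ↔ ((u + 1) * 5 ≥ (c - 1) * 3) := by omega
      rw [if_congr hcond rfl rfl]
      split_ifs with h
      · rw [bRehash_eq, bGrow_eq, Nat.mul_comm 4 (u + 1)]
      · rfl

lemma bFill_eq :
    ∀ (xs : List Int) (s : List (Option (Int × Int))) (c u : Nat),
      bFill ⟨s, c, u⟩ xs =
        ⟨(xs.foldl pvSetAddStep (s, c, u)).1, (xs.foldl pvSetAddStep (s, c, u)).2.1,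
          (xs.foldl pvSetAddStep (s, c, u)).2.2⟩ := by
  intro xs
  induction xs with
  | nil => intro s c u; rfl
  | cons x xs ih =>
      intro s c u
      show bFill (bInsert ⟨s, c, u⟩ x) xs = _
      rw [bInsert_eq, ih, List.foldl_cons]

lemma bElems_eq (xs : List Int) : bElems xs = pvPySetList xs := by
  unfold bElems pvPySetList
  rw [bFill_eq]

-- getD / set interaction
lemma getD_set (parts : List (List Int)) (k j : Nat) (v : List Int) (hk : k < parts.length) :
    (parts.set k v).getD j [] = if j = k then v else parts.getD j [] := by
  by_cases h : j = k
  · subst h; simp [List.getD, hk]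
  · simp [List.getD, h, Ne.symm h]

lemma pvAddAt_nat (parts : List (List Int)) (k : Nat) (e : Int) :
    pvAddAt parts (k : Int) e = parts.set k (PySem.Set.add (parts.getD k []) e) := by
  simp [pvAddAt]

-- Python i % n for i : Nat, 0 < n
lemma pymod_nat (i : Nat) (n : Int) (hn : 0 < n) :
    PySem.Int.mod (i : Int) n = ((i % n.toNat : Nat) : Int) := by
  rw [PySem.Int.mod_eq_emod_of_pos hn]
  conv_lhs => rw [← Int.toNat_of_nonneg (le_of_lt hn)]
  exact (Int.natCast_mod i n.toNat).symm

lemma pvStride_nil (m : Nat) : pvStride [] m = [] := by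
  rw [pvStride.eq_def]

lemma pvStride_cons (x : Int) (rest : List Int) (m : Nat) :
    pvStride (x :: rest) m = x :: pvStride (rest.drop (m - 1)) m := by
  rw [pvStride.eq_def]

-- the loop invariant: partition j of pvLoop2 is parts[j] updated with the elements at
-- positions p of L with (i + p) % m = j, i.e. the stride starting at distance d.
lemma pvLoop2_getD (n : Int) (hn : 0 < n) :
    ∀ (L : List Int) (i : Nat) (parts : List (List Int)),
      parts.length = n.toNat →
      ∀ (j d : Nat), j < n.toNat → d < n.toNat → (i + d) % n.toNat = j →
      (pvLoop2 L i n parts).getD j [] =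
        PySem.Set.update (parts.getD j []) (pvStride (L.drop d) n.toNat) := by
  intro L
  induction L with
  | nil =>
      intro i parts hlen j d hj hd hrel
      simp [pvLoop2, pvStride_nil, PySem.Set.update]
  | cons x rest ih =>
      intro i parts hlen j d hj hd hrel
      have hm : 0 < n.toNat := by omega
      have hidx : i % n.toNat < parts.length := by rw [hlen]; exact Nat.mod_lt _ hm
      have hstep : pvLoop2 (x :: rest) i n parts
          = pvLoop2 rest (i + 1) n (pvAddAt parts (PySem.Int.mod (i : Int) n) x) := rfl
      rw [hstep, pymod_nat i n hn, pvAddAt_nat]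
      set parts' := parts.set (i % n.toNat) (PySem.Set.add (parts.getD (i % n.toNat) []) x) with hparts'
      have hlen' : parts'.length = n.toNat := by simp [hparts', hlen]
      rcases Nat.eq_zero_or_pos d with hd0 | hdpos
      · -- x goes to partition j
        subst hd0
        have hj' : i % n.toNat = j := by simpa using hrel
        have hrel' : (i + 1 + (n.toNat - 1)) % n.toNat = j := by
          have : i + 1 + (n.toNat - 1) = i + n.toNat := by omega
          rw [this, Nat.add_mod_right, hj']
        rw [ih (i + 1) parts' hlen' j (n.toNat - 1) hj (by omega) hrel']
        have hget : parts'.getD j [] = PySem.Set.add (parts.getD j []) x := by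
          rw [hparts', getD_set _ _ _ _ hidx, if_pos hj'.symm, hj']
        rw [hget, List.drop_zero, pvStride_cons]
        simp [PySem.Set.update]
      · -- x goes elsewhere
        have hne : i % n.toNat ≠ j := by
          intro heq
          have h1 : (i + d) % n.toNat = i % n.toNat := by rw [hrel, heq]
          have h2 : (i + d) ≡ (i + 0) [MOD n.toNat] := by
            unfold Nat.ModEq; simpa using h1
          have h3 : d ≡ 0 [MOD n.toNat] := Nat.ModEq.add_left_cancel' i h2
          have h4 : d % n.toNat = 0 := by simpa [Nat.ModEq] using h3
          rw [Nat.mod_eq_of_lt hd] at h4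
          omega
        have hrel' : (i + 1 + (d - 1)) % n.toNat = j := by
          have : i + 1 + (d - 1) = i + d := by omega
          rw [this, hrel]
        rw [ih (i + 1) parts' hlen' j (d - 1) hj (by omega) hrel']
        have hget : parts'.getD j [] = parts.getD j [] := by
          rw [hparts', getD_set _ _ _ _ hidx,
            if_neg (fun h : j = i % n.toNat => hne h.symm)]
        rw [hget]
        have hdrop : (x :: rest).drop d = rest.drop (d - 1) := by
          rcases d with _ | d'; · omega
          · simp
        rw [hdrop]

lemma pvLoop2_length (n : Int) :
    ∀ (L : List Int) (i : Nat) (parts : List (List Int)),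
      (pvLoop2 L i n parts).length = parts.length := by
  intro L
  induction L with
  | nil => intro i parts; simp [pvLoop2]
  | cons x rest ih =>
      intro i parts
      show (pvLoop2 rest (i + 1) n _).length = _
      rw [ih]
      simp [pvAddAt, PySem.List.length_pySetD]

-- in the n ≥ len branch the guard always fires and i % n = i, so loop1 = loop2
lemma pvLoop1_eq_pvLoop2 (n : Int) (hn : 0 < n) :
    ∀ (L : List Int) (i : Nat) (parts : List (List Int)),
      (i : Int) + L.length ≤ n →
      pvLoop1 L i n parts = pvLoop2 L i n parts := by
  intro L
  induction L with
  | nil => intro i parts _; rfl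
  | cons x rest ih =>
      intro i parts hle
      have hlen : ((x :: rest).length : Int) = (rest.length : Int) + 1 := by simp
      have hi : (i : Int) < n := by rw [hlen] at hle; omega
      have hiN : i < n.toNat := by omega
      have hmod : PySem.Int.mod (i : Int) n = (i : Int) := by
        rw [pymod_nat i n hn, Nat.mod_eq_of_lt hiN]
      have hle' : ((i + 1 : Nat) : Int) + (rest.length : Int) ≤ n := by
        rw [hlen] at hle; push_cast; omega
      show pvLoop1 rest (i + 1) n (if (i : Int) < n then pvAddAt parts (i : Int) x else parts)
          = pvLoop2 rest (i + 1) n (pvAddAt parts (PySem.Int.mod (i : Int) n) x)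
      rw [if_pos hi, hmod]
      exact ih (i + 1) _ hle'

lemma pvLoop2_eq_alt (input_set : List Int) (n : Int) (hn : 0 < n) :
    pvLoop2 input_set 0 n (List.replicate n.toNat (PySem.Set.empty : List Int))
      = (PySem.List.pyRange 0 n 1).map
          (fun j => PySem.Set.ofList (pvStride (input_set.drop j.toNat) n.toNat)) := by
  have hm : (0 : Int) ≤ n := le_of_lt hn
  apply List.ext_getElem
  · rw [pvLoop2_length]
    simp [PySem.List.pyRange_one]
  · intro j h1 h2
    have hjm : j < n.toNat := by
      rw [pvLoop2_length] at h1; simpa using h1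
    have hA : (pvLoop2 input_set 0 n (List.replicate n.toNat (PySem.Set.empty : List Int))).getD j []
        = PySem.Set.update ((List.replicate n.toNat (PySem.Set.empty : List Int)).getD j [])
            (pvStride (input_set.drop j) n.toNat) := by
      exact pvLoop2_getD n hn input_set 0 _ (by simp) j j hjm hjm (by simpa using Nat.mod_eq_of_lt hjm)
    have hgetA : (pvLoop2 input_set 0 n (List.replicate n.toNat (PySem.Set.empty : List Int)))[j]
        = (pvLoop2 input_set 0 n (List.replicate n.toNat (PySem.Set.empty : List Int))).getD j [] := by
      rw [List.getD_eq_getElem _ _ h1]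
    rw [hgetA, hA]
    have hrepl : (List.replicate n.toNat (PySem.Set.empty : List Int)).getD j [] = [] := by
      rw [List.getD_eq_getElem _ _ (by simpa using hjm)]; simp [PySem.Set.empty]
    rw [hrepl]
    -- B side
    simp only [PySem.List.pyRange_one]
    have h2' : j < ((List.range (n - 0).toNat).map (fun k => (0 : Int) + k)).length := by
      simpa using hjm
    rw [List.getElem_map, List.getElem_map, List.getElem_range]
    simp [PySem.Set.ofList_eq_foldl, PySem.Set.update]

-- ===== VERDICT (by name: the statement is the Claim_ definition above) =====
theorem partition_set_into_n_parts_spec : Claim_equal_partition_set_into_n_parts := by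
  intro input_set n _ hpre
  have hn : 0 < n := hpre
  unfold Spec_partition_set_into_n_parts partition_set_into_n_parts partition_set_into_n_parts_alt
  dsimp only
  rw [bElems_eq]
  split_ifs with h
  · rw [pvLoop1_eq_pvLoop2 n hn (pvPySetList input_set) 0 _ (by simpa using h)]
    exact pvLoop2_eq_alt (pvPySetList input_set) n hn
  · exact pvLoop2_eq_alt (pvPySetList input_set) n hn
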